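-- pv_equiv track=rewrite | github.com/TT-PGS/Intern_1 | staticAlgos/SA.py | _render_gantt_ascii
-- ===== SOURCE A (Python) =====
-- import math
--
-- def _render_gantt_ascii(
--     segments_by_machine: dict[int, list[tuple[int,int,int]]],
--     horizon: int,
--     max_width: int = 120,
-- ) -> str:
--     """
--     Vẽ Gantt chart ASCII. Nếu horizon quá lớn, tự scale để vừa max_width.
--     Ký hiệu:
--       - '.': idle (trống)
--       - '0'..'9': job_id % 10 (nếu job lớn hơn 9 thì lặp lại chữ số)
--     """
--     if horizon <= 0:
--         return "(empty schedule)"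
--
--     scale = max(1, math.ceil(horizon / max_width))
--     width = horizon // scale + 1  # số ký tự cho mỗi dòng
--
--     lines = []
--     # từng máy một
--     for machine_id in sorted(segments_by_machine.keys()):
--         row = ['.'] * width
--         for start, end, job_id in segments_by_machine[machine_id]:
--             # tô kín [start, end)
--             for t in range(start, end):
--                 idx = t // scale
--                 if 0 <= idx < width:
--                     row[idx] = str(job_id % 10)
--         lines.append(f"M{machine_id:02d} | " + ''.join(row) + " |")
--
--     # thêm thước đo (scale)
--     scale_note = f"(scale = {scale} time-unit/char, horizon = {horizon})"
--     ruler = "     " + ''.join(['|' if (i % 10 == 0) else ' ' for i in range(width)])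
--     index_line = "     " + ''.join([str((i*scale) % 10) for i in range(width)])
--
--     return "\n".join(lines + ["", scale_note, ruler, index_line])
-- ===== SOURCE B (Python) =====
-- def _cell(segs, lo, hi):
--     """Character of the column whose time cell is [lo, hi): digit of the last
--     intersecting segment in list order, '.' if none."""
--     ch = '.'
--     for s, e, j in segs:
--         if max(s, lo) < min(e, hi):
--             ch = str(j % 10)
--     return ch
--
--
-- def _render_gantt_ascii(
--     segments_by_machine: dict[int, list[tuple[int,int,int]]],
--     horizon: int,
--     max_width: int = 120,
-- ) -> str:
--     if horizon <= 0:
--         return "(empty schedule)"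
--
--     scale = max(1, -(-horizon // max_width))  # exact ceiling division
--     width = horizon // scale + 1
--
--     # the start time of each column drives everything: rows, ruler and index line
--     cols = [i * scale for i in range(width)]
--
--     body = [
--         f"M{m:02d} | "
--         + ''.join(_cell(segments_by_machine[m], lo, lo + scale) for lo in cols)
--         + " |"
--         for m in sorted(segments_by_machine)
--     ]
--     tail = [
--         "",
--         f"(scale = {scale} time-unit/char, horizon = {horizon})",
--         "     " + ''.join('|' if lo % (10 * scale) == 0 else ' ' for lo in cols),
--         "     " + ''.join(str(lo % 10) for lo in cols),
--     ]
--     return "\n".join(body + tail)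
-- ===== Notes on version B (the rewrite author's own statement) =====
-- stated objective: alternative
-- what changed: B is column-major and list-driven: it precomputes the list of column start times and builds every machine row, the ruler and the index line as comprehensions over that list (each row cell scanning the machine's segments for the last intersecting one), instead of A's index-driven passes that paint every covered time unit into a mutable row; the machine lines come from a comprehension over the sorted keys rather than A's accumulator loop, and ceiling division replaces math.ceil.
import Mathlib
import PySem

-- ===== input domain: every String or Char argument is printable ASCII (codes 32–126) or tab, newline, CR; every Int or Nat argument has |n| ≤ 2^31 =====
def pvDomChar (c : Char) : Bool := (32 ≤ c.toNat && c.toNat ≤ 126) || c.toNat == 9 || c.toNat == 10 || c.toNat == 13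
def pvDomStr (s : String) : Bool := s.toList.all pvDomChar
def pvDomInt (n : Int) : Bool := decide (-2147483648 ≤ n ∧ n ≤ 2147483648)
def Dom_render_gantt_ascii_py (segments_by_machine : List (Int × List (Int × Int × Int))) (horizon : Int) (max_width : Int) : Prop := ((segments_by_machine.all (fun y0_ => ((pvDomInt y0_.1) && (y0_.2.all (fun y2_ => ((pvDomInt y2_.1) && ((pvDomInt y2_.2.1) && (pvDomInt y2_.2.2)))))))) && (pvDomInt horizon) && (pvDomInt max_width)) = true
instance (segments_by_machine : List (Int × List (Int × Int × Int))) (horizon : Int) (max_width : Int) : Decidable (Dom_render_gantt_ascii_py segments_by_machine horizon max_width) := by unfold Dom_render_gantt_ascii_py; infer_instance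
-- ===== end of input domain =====

-- B builds rows, ruler and index line column-major from the precomputed list of column
-- start times (each cell scans the machine's segments), instead of A's painting of every
-- covered time unit into a mutable row; same output, similar cost.

-- math.ceil(horizon / max_width): Python's float true division is correctly rounded, and for
-- |horizon|, |max_width| ≤ 2^31 < 2^53 that rounding can never cross an integer boundary, so
-- ceil of the float equals exact ceiling division -((-a) // b); exact on Dom.
def pvCeilDiv (a b : Int) : Int := -(PySem.Int.floordiv (-a) b)

-- str(m % 10): exactly one character '0'..'9', since 0 ≤ m % 10 < 10 (Python mod, positive divisor)
def pvDigit (m : Int) : Char := Char.ofNat (48 + (PySem.Int.mod m 10).toNat)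

-- f"{n:02d}": zero-pad to width 2 (sign in front; only single-digit 0..9 is ever shorter than 2)
def pvPad2 (n : Int) : List Char := let s := PySem.Int.toChars n; if s.length < 2 then '0' :: s else s

-- ===== PORT A =====
-- inner double loop of A: paint [start,end) of one segment into the row, one time unit at a time
def pvFill (scale width : Int) (row : List Char) (seg : Int × Int × Int) : List Char :=
  (PySem.List.pyRange seg.1 seg.2.1 1).foldl
    (fun row t =>
      if 0 ≤ PySem.Int.floordiv t scale ∧ PySem.Int.floordiv t scale < width then
        row.set (PySem.Int.floordiv t scale).toNat (pvDigit seg.2.2)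
      else row)
    row

def render_gantt_ascii_py (segments_by_machine : List (Int × List (Int × Int × Int))) (horizon : Int) (max_width : Int) : String :=
  if horizon ≤ 0 then "(empty schedule)"
  else
    let d := PySem.Dict.ofList segments_by_machine
    let scale := max 1 (pvCeilDiv horizon max_width)
    let width := PySem.Int.floordiv horizon scale + 1
    let lines := (PySem.List.sorted (PySem.Dict.keys d) (fun k => k) false).foldl
      (fun lines machine_id =>
        let row := (PySem.Dict.getD d machine_id []).foldl (pvFill scale width)
          (List.replicate width.toNat '.')
        lines ++ ['M' :: pvPad2 machine_id ++ " | ".toList ++ row ++ " |".toList])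
      []
    let scale_note := "(scale = ".toList ++ PySem.Int.toChars scale
      ++ " time-unit/char, horizon = ".toList ++ PySem.Int.toChars horizon ++ [')']
    let ruler := "     ".toList
      ++ (PySem.List.pyRange 0 width 1).map (fun i => if PySem.Int.mod i 10 = 0 then '|' else ' ')
    let index_line := "     ".toList ++ (PySem.List.pyRange 0 width 1).map (fun i => pvDigit (i * scale))
    String.ofList (PySem.Chars.join ['\n'] (lines ++ [[], scale_note, ruler, index_line]))

-- ===== PORT B =====
-- Source B's _cell: character of the column whose time cell is [lo, hi); str(j % 10) as the
-- character code 48 + j % 10 (Lean's Int '%' has a positive divisor here, so it is Python's)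
def pvCell (segs : List (Int × Int × Int)) (lo hi : Int) : Char :=
  segs.foldl
    (fun ch seg =>
      if max seg.1 lo < min seg.2.1 hi then Char.ofNat (48 + (seg.2.2 % 10).toNat) else ch)
    '.'

def render_gantt_ascii_py_alt (segments_by_machine : List (Int × List (Int × Int × Int))) (horizon : Int) (max_width : Int) : String :=
  if horizon ≤ 0 then "(empty schedule)"
  else
    let d := PySem.Dict.ofList segments_by_machine
    let scale := max 1 (-(PySem.Int.floordiv (-horizon) max_width))
    let width := PySem.Int.floordiv horizon scale + 1
    let cols := (PySem.List.pyRange 0 width 1).map (fun i => i * scale)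
    let body := (PySem.List.sorted (PySem.Dict.keys d) (fun k => k) false).map
      (fun m =>
        'M' :: pvPad2 m ++ " | ".toList
          ++ cols.map (fun lo => pvCell (PySem.Dict.getD d m []) lo (lo + scale))
          ++ " |".toList)
    let tail := [[],
      "(scale = ".toList ++ PySem.Int.toChars scale
        ++ " time-unit/char, horizon = ".toList ++ PySem.Int.toChars horizon ++ [')'],
      "     ".toList ++ cols.map (fun lo => if lo % (10 * scale) = 0 then '|' else ' '),
      "     ".toList ++ cols.map (fun lo => Char.ofNat (48 + (lo % 10).toNat))]
    String.ofList (PySem.Chars.join ['\n'] (body ++ tail))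

-- ===== PRECONDITION & SPEC =====
-- Pre_ excludes only inputs where A raises: horizon > 0 with max_width = 0 is a ZeroDivisionError
-- in math.ceil(horizon / max_width).
def Pre_render_gantt_ascii_py (segments_by_machine : List (Int × List (Int × Int × Int))) (horizon : Int) (max_width : Int) : Prop :=
  horizon ≤ 0 ∨ max_width ≠ 0
instance (segments_by_machine : List (Int × List (Int × Int × Int))) (horizon : Int) (max_width : Int) : Decidable (Pre_render_gantt_ascii_py segments_by_machine horizon max_width) := by unfold Pre_render_gantt_ascii_py; infer_instance

def pvWitness_render_gantt_ascii_py : (List (Int × List (Int × Int × Int))) × Int × Int := ([(0, [(0, 2, 5)])], 4, 10)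

def Spec_render_gantt_ascii_py (segments_by_machine : List (Int × List (Int × Int × Int))) (horizon : Int) (max_width : Int) (out : String) : Prop := out = render_gantt_ascii_py_alt segments_by_machine horizon max_width
instance (segments_by_machine : List (Int × List (Int × Int × Int))) (horizon : Int) (max_width : Int) (out : String) : Decidable (Spec_render_gantt_ascii_py segments_by_machine horizon max_width out) := by unfold Spec_render_gantt_ascii_py; infer_instance

-- ===== CLAIM (what is proved, stated in full; the proofs are below) =====
def Claim_equal_render_gantt_ascii_py : Prop := ∀ (segments_by_machine : List (Int × List (Int × Int × Int))) (horizon : Int) (max_width : Int), Dom_render_gantt_ascii_py segments_by_machine horizon max_width → Pre_render_gantt_ascii_py segments_by_machine horizon max_width → Spec_render_gantt_ascii_py segments_by_machine horizon max_width (render_gantt_ascii_py segments_by_machine horizon max_width)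

-- ===== LEMMAS AND PROOFS =====

-- str(m % 10) written with Lean's own '%': the divisor 10 is positive, so Python's mod is emod
theorem pvDigit_eq (m : Int) : pvDigit m = Char.ofNat (48 + (m % 10).toNat) := by
  unfold pvDigit
  rw [PySem.Int.mod_eq_emod_of_pos (by norm_num)]

theorem length_pvFill (scale width : Int) (row : List Char) (seg : Int × Int × Int) :
    (pvFill scale width row seg).length = row.length := by
  unfold pvFill
  generalize PySem.List.pyRange seg.1 seg.2.1 1 = l
  induction l generalizing row with
  | nil => rfl
  | cons t rest ih =>
    rw [List.foldl_cons, ih]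
    split <;> simp

-- column n after painting one segment: the job digit if the segment meets cell n, else unchanged
theorem getElem?_pvFill (scale width : Int) (hs : 0 < scale) (s e j : Int)
    (row : List Char) (n : Nat) (hw : (n : Int) < width) :
    (pvFill scale width row (s, e, j))[n]? =
      row[n]?.map (fun c =>
        if max s ((n : Int) * scale) < min e ((n : Int) * scale + scale) then pvDigit j else c) := by
  have key : ∀ (k : Nat) (s : Int) (row : List Char), (e - s).toNat = k →
      (pvFill scale width row (s, e, j))[n]? =
        row[n]?.map (fun c =>
          if max s ((n : Int) * scale) < min e ((n : Int) * scale + scale) then pvDigit j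
          else c) := by
    intro k
    induction k with
    | zero =>
      intro s row hk
      have hse : e ≤ s := by omega
      unfold pvFill
      simp only [PySem.List.pyRange_one_eq_nil hse, List.foldl_nil]
      have hcond : ¬ (max s ((n : Int) * scale) < min e ((n : Int) * scale + scale)) := by omega
      simp [hcond]
    | succ k ih =>
      intro s row hk
      have hse : s < e := by omega
      have hunf : pvFill scale width row (s, e, j) =
          pvFill scale width
            (if 0 ≤ PySem.Int.floordiv s scale ∧ PySem.Int.floordiv s scale < width then
              row.set (PySem.Int.floordiv s scale).toNat (pvDigit j)
            else row) (s + 1, e, j) := by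
        unfold pvFill
        rw [PySem.List.pyRange_one_cons hse, List.foldl_cons]
      rw [hunf, ih (s + 1) _ (by omega)]
      have hchar := PySem.Int.floordiv_eq_iff_of_pos (a := s) (b := scale) (q := (n : Int)) hs
      have hmul : ((n : Int) + 1) * scale = (n : Int) * scale + scale := by ring
      rw [hmul] at hchar
      by_cases hcell : (n : Int) * scale ≤ s ∧ s < (n : Int) * scale + scale
      · have hidx : PySem.Int.floordiv s scale = (n : Int) := hchar.mpr ⟨hcell.1, hcell.2⟩
        rw [if_pos (by rw [hidx]; exact ⟨Int.natCast_nonneg n, hw⟩)]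
        rw [hidx]
        have htn : ((n : Int)).toNat = n := by omega
        rw [htn, List.getElem?_set]
        by_cases hnl : n < row.length
        · rw [if_pos hnl, List.getElem?_eq_getElem hnl]
          simp only [Option.map_some]
          rw [if_pos (show max s ((n : Int) * scale) < min e ((n : Int) * scale + scale) by omega)]
          split <;> rfl
        · rw [if_neg hnl, List.getElem?_eq_none (by omega)]
          simp
      · have hidx_ne : PySem.Int.floordiv s scale ≠ (n : Int) := fun h => hcell (hchar.mp h)
        have hkeep : (if 0 ≤ PySem.Int.floordiv s scale ∧ PySem.Int.floordiv s scale < width then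
            row.set (PySem.Int.floordiv s scale).toNat (pvDigit j) else row)[n]? = row[n]? := by
          split
          · rename_i hb
            rw [List.getElem?_set_ne]
            intro hEq
            exact hidx_ne (by omega)
          · rfl
        rw [hkeep]
        have hiff : (max (s + 1) ((n : Int) * scale) < min e ((n : Int) * scale + scale)) ↔
            (max s ((n : Int) * scale) < min e ((n : Int) * scale + scale)) := by omega
        simp only [hiff]
  exact key (e - s).toNat s row rfl

theorem length_foldl_pvFill (scale width : Int) (segs : List (Int × Int × Int)) (row : List Char) :
    (segs.foldl (pvFill scale width) row).length = row.length := by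
  induction segs generalizing row with
  | nil => rfl
  | cons seg rest ih => rw [List.foldl_cons, ih, length_pvFill]

theorem getElem?_foldl_pvFill (scale width : Int) (hs : 0 < scale)
    (segs : List (Int × Int × Int)) (row : List Char) (n : Nat) (hw : (n : Int) < width) :
    (segs.foldl (pvFill scale width) row)[n]? =
      row[n]?.map (fun c => segs.foldl
        (fun ch seg =>
          if max seg.1 ((n : Int) * scale) < min seg.2.1 ((n : Int) * scale + scale)
          then pvDigit seg.2.2 else ch) c) := by
  induction segs generalizing row with
  | nil => simp
  | cons seg rest ih =>
    obtain ⟨s, e, j⟩ := seg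
    rw [List.foldl_cons, ih (pvFill scale width row (s, e, j)),
      getElem?_pvFill scale width hs s e j row n hw, Option.map_map]
    rfl

-- the whole row of one machine: A's painted row equals B's column-major row
theorem row_eq (scale width : Int) (hs : 0 < scale) (segs : List (Int × Int × Int)) :
    segs.foldl (pvFill scale width) (List.replicate width.toNat '.') =
      ((PySem.List.pyRange 0 width 1).map (fun i => i * scale)).map
        (fun lo => pvCell segs lo (lo + scale)) := by
  rw [List.map_map]
  apply List.ext_getElem?
  intro n
  by_cases hn : n < width.toNat
  · have hw : (n : Int) < width := by omega
    rw [getElem?_foldl_pvFill scale width hs segs _ n hw]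
    rw [List.getElem?_eq_getElem (by simpa using hn), List.getElem_replicate]
    rw [List.getElem?_eq_getElem (by simpa [PySem.List.length_pyRange_one] using hn)]
    simp only [List.getElem_map, PySem.List.getElem_pyRange_one, Option.map_some, zero_add,
      Function.comp_apply]
    simp only [pvCell, pvDigit_eq]
  · rw [List.getElem?_eq_none, List.getElem?_eq_none]
    · simp only [List.length_map, PySem.List.length_pyRange_one]
      omega
    · rw [length_foldl_pvFill]
      simpa using hn

-- ===== VERDICT (by name: the statement is the Claim_ definition above) =====
theorem render_gantt_ascii_py_spec : Claim_equal_render_gantt_ascii_py := by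
  intro segments_by_machine horizon max_width hDom hPre
  unfold Spec_render_gantt_ascii_py
  by_cases hh : horizon ≤ 0
  · simp only [render_gantt_ascii_py, render_gantt_ascii_py_alt, if_pos hh]
  · simp only [render_gantt_ascii_py, render_gantt_ascii_py_alt, if_neg hh, pvCeilDiv]
    have hs : 0 < max 1 (-(PySem.Int.floordiv (-horizon) max_width)) :=
      lt_of_lt_of_le one_pos (le_max_left _ _)
    set scale := max 1 (-(PySem.Int.floordiv (-horizon) max_width)) with hscale
    set width := PySem.Int.floordiv horizon scale + 1 with hwidth
    -- ruler: lo % (10*scale) = 0 at lo = i*scale iff i % 10 = 0 (cancel the common factor scale)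
    have hruler : ((PySem.List.pyRange 0 width 1).map (fun i => i * scale)).map
          (fun lo => if lo % (10 * scale) = 0 then '|' else ' ')
        = (PySem.List.pyRange 0 width 1).map
          (fun i => if PySem.Int.mod i 10 = 0 then '|' else ' ') := by
      rw [List.map_map]
      apply List.map_congr_left
      intro i _
      simp only [Function.comp_apply]
      have h1 : ((i * scale) % (10 * scale) = 0) ↔ (PySem.Int.mod i 10 = 0) := by
        rw [PySem.Int.mod_eq_zero_iff_dvd]
        constructor
        · intro hc
          exact (mul_dvd_mul_iff_right (show scale ≠ 0 by omega)).mp (Int.dvd_of_emod_eq_zero hc)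
        · intro hd
          exact Int.emod_eq_zero_of_dvd (mul_dvd_mul_right hd scale)
      by_cases h : PySem.Int.mod i 10 = 0
      · rw [if_pos (h1.mpr h), if_pos h]
      · rw [if_neg (fun hc => h (h1.mp hc)), if_neg h]
    -- index line: str((i*scale) % 10), written with Lean's '%', is pvDigit (i*scale)
    have hindex : ((PySem.List.pyRange 0 width 1).map (fun i => i * scale)).map
          (fun lo => Char.ofNat (48 + (lo % 10).toNat))
        = (PySem.List.pyRange 0 width 1).map (fun i => pvDigit (i * scale)) := by
      rw [List.map_map]
      apply List.map_congr_left
      intro i _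
      simp only [Function.comp_apply, pvDigit_eq]
    -- machine lines: A's accumulator loop is B's map (foldl_append_singleton_eq_map),
    -- and each painted row is the column-major row (row_eq)
    rw [PySem.List.foldl_append_singleton_eq_map, List.nil_append, hruler, hindex]
    congr 1
    congr 1
    congr 1
    apply List.map_congr_left
    intro m _
    rw [row_eq _ _ hs]
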